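-- pv_equiv track=rewrite | github.com/yong124/GSD | content/tools/json_to_generated_xlsx.py | build_character_emotion_rows
-- ===== SOURCE A (Python) =====
-- def build_character_emotion_rows(data):
--     rows = []
--     character_emotions = data.get("character_emotions", {})
--     for character_id in sorted(character_emotions.keys()):
--         emotions = character_emotions[character_id] or {}
--         for emotion_type in sorted(emotions.keys()):
--             rows.append({
--                 "CharacterID": character_id,
--                 "EmotionType": emotion_type,
--                 "ImagePath": emotions.get(emotion_type),
--             })
--     return rows
-- ===== SOURCE B (Python) =====
-- def build_character_emotion_rows(data):
--     character_emotions = data.get("character_emotions", {})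
--     triples = [
--         (cid, et, path)
--         for cid, ems in character_emotions.items()
--         for et, path in (ems or {}).items()
--     ]
--     triples.sort(key=lambda t: (t[0], t[1]))
--     return [
--         {"CharacterID": cid, "EmotionType": et, "ImagePath": path}
--         for cid, et, path in triples
--     ]
-- ===== Notes on version B (the rewrite author's own statement) =====
-- stated objective: alternative
-- what changed: Replaces A's two nested per-level sorted() loops with a single flatten of all (character, emotion, path) triples in dict order, ONE global sort by the (cid, et) key pair, and one final mapping pass to row dicts.
import Mathlib
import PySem

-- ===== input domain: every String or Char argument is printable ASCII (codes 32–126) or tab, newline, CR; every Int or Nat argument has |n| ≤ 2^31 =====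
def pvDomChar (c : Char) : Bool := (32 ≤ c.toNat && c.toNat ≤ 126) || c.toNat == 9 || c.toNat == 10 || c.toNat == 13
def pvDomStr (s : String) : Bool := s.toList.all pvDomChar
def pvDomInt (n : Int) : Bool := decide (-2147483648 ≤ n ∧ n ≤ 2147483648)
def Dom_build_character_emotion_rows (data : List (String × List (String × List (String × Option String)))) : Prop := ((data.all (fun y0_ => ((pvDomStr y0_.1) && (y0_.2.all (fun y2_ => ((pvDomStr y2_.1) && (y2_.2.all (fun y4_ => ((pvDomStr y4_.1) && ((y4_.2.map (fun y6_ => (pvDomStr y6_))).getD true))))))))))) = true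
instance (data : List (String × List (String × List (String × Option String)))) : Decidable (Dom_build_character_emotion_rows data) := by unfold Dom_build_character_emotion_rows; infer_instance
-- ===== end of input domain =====

-- B replaces A's two nested per-level sorted() loops by one flatten pass, ONE global sort of all
-- (character, emotion, path) triples by the (cid, et) key pair, and one final mapping pass (objective: alternative).

-- ===== PORT A =====
-- Literal port of A: nested loops over sorted dict keys, appending one row dict per emotion.
-- 'emotions or {}' is the identity at this type: a dict value is falsy exactly when it is the empty dict.
-- 'character_emotions[character_id]' cannot raise (character_id comes from its keys); ported as getD with default [].
def build_character_emotion_rows (data : List (String × List (String × List (String × Option String)))) : List (List (String × Option String)) :=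
  let character_emotions := (PySem.Dict.mk data).getD "character_emotions" []
  (PySem.List.sorted (PySem.Dict.mk character_emotions).keys (fun k => k) false).foldl
    (fun rows character_id =>
      let emotions := (PySem.Dict.mk character_emotions).getD character_id []
      (PySem.List.sorted (PySem.Dict.mk emotions).keys (fun k => k) false).foldl
        (fun rows emotion_type =>
          rows ++ [[("CharacterID", some character_id), ("EmotionType", some emotion_type),
                    ("ImagePath", (PySem.Dict.mk emotions).getD emotion_type none)]])
        rows)
    []

-- ===== PORT B =====
-- Port of Source B: flatten all triples in dict order, one global sort by the (cid, et) pair, one mapping pass.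
-- '(ems or {}).items()' is items() at this type (the empty dict is the only falsy dict).
def build_character_emotion_rows_alt (data : List (String × List (String × List (String × Option String)))) : List (List (String × Option String)) :=
  let character_emotions := (PySem.Dict.mk data).getD "character_emotions" []
  let triples : List (String × String × Option String) :=
    (PySem.Dict.mk character_emotions).items.flatMap
      (fun p => (PySem.Dict.mk p.2).items.map (fun q => (p.1, q.1, q.2)))
  (PySem.List.sorted2 triples (fun t => t.1) (fun t => t.2.1) false).map
    (fun t => [("CharacterID", some t.1), ("EmotionType", some t.2.1), ("ImagePath", t.2.2)])

-- ===== PRECONDITION & SPEC =====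
-- Pre_ excludes association lists in which the value of 'character_emotions', or one of its inner
-- emotion dicts, carries duplicate keys: no Python dict produces such a list (Python dict keys are
-- unique), and both ports' behaviour on them is accidental.
def Pre_build_character_emotion_rows (data : List (String × List (String × List (String × Option String)))) : Prop :=
  let ce := (PySem.Dict.mk data).getD "character_emotions" []
  (ce.map (fun p => p.1)).Nodup ∧ ∀ p ∈ ce, (p.2.map (fun q => q.1)).Nodup
instance (data : List (String × List (String × List (String × Option String)))) : Decidable (Pre_build_character_emotion_rows data) := by unfold Pre_build_character_emotion_rows; infer_instance

def pvWitness_build_character_emotion_rows : (List (String × List (String × List (String × Option String)))) :=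
  [("character_emotions", [("b", [("x", some "p")]), ("a", [("z", none), ("y", some "q")])])]

def Spec_build_character_emotion_rows (data : List (String × List (String × List (String × Option String)))) (out : List (List (String × Option String))) : Prop := out = build_character_emotion_rows_alt data
instance (data : List (String × List (String × List (String × Option String)))) (out : List (List (String × Option String))) : Decidable (Spec_build_character_emotion_rows data out) := by unfold Spec_build_character_emotion_rows; infer_instance

-- ===== CLAIM (what is proved, stated in full; the proofs are below) =====
def Claim_equal_build_character_emotion_rows : Prop := ∀ (data : List (String × List (String × List (String × Option String)))), Dom_build_character_emotion_rows data → Pre_build_character_emotion_rows data → Spec_build_character_emotion_rows data (build_character_emotion_rows data)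

-- ===== LEMMAS AND PROOFS =====

-- sorted2 with keys k1, k2 is sorted with the lexicographic key  toLex (k1 ·, k2 ·).
theorem sorted2_eq_sorted_lex (xs : List (String × String × Option String)) :
    PySem.List.sorted2 xs (fun t => t.1) (fun t => t.2.1) false
      = PySem.List.sorted xs (fun t => (toLex (t.1, t.2.1) : Lex (String × String))) false := by
  simp only [PySem.List.sorted2, PySem.List.sorted, if_neg (by decide : ¬ (false = true))]
  have hb : (fun (a b : String × String × Option String) =>
      decide (a.1 < b.1) || (!decide (b.1 < a.1) && decide (a.2.1 < b.2.1)))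
      = (fun a b => decide ((toLex (a.1, a.2.1) : Lex (String × String)) < toLex (b.1, b.2.1))) := by
    funext a b
    rcases lt_trichotomy a.1 b.1 with h | h | h
    · simp [h, Prod.Lex.lt_iff]
    · simp [h, Prod.Lex.lt_iff]
    · simp [h, not_lt_of_gt h, ne_of_gt h, Prod.Lex.lt_iff]
  rw [hb]

-- Pairwise lexicographic strictness of a flatMap whose groups have strictly increasing cids,
-- are strictly increasing inside, and carry their cid as first component.
theorem pairwise_flatMap_lex (cids : List String) (g : String → List (String × String × Option String))
    (h1 : cids.Pairwise (· < ·))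
    (h2 : ∀ c ∈ cids, (g c).Pairwise (fun a b => (toLex (a.1, a.2.1) : Lex (String × String)) < toLex (b.1, b.2.1)))
    (h3 : ∀ c ∈ cids, ∀ t ∈ g c, t.1 = c) :
    (cids.flatMap g).Pairwise (fun a b => (toLex (a.1, a.2.1) : Lex (String × String)) < toLex (b.1, b.2.1)) := by
  induction cids with
  | nil => simp
  | cons c cs ih =>
    rw [List.flatMap_cons, List.pairwise_append]
    refine ⟨h2 c (by simp), ih (List.pairwise_cons.mp h1).2
        (fun c' hc' => h2 c' (by simp [hc'])) (fun c' hc' => h3 c' (by simp [hc'])), ?_⟩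
    intro a ha b hb
    obtain ⟨c', hc', hb'⟩ := List.mem_flatMap.mp hb
    have hcc' : c < c' := (List.pairwise_cons.mp h1).1 c' hc'
    have ha1 : a.1 = c := h3 c (by simp) a ha
    have hb1 : b.1 = c' := h3 c' (by simp [hc']) b hb'
    rw [Prod.Lex.lt_iff]
    left
    simpa [ha1, hb1] using hcc'

theorem build_character_emotion_rows_eq (data : List (String × List (String × List (String × Option String))))
    (hpre : Pre_build_character_emotion_rows data) :
    build_character_emotion_rows data = build_character_emotion_rows_alt data := by
  obtain ⟨hnd, hinner⟩ := hpre
  simp only [build_character_emotion_rows, build_character_emotion_rows_alt]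
  set ce := (PySem.Dict.mk data).getD "character_emotions" [] with hce
  simp only [PySem.List.foldl_append_singleton_eq_map, PySem.List.foldl_append_eq_flatMap,
    List.nil_append]
  rw [sorted2_eq_sorted_lex]
  set ceKeys := (PySem.Dict.mk ce).keys with hk
  have hkeys : ceKeys = ce.map (fun p => p.1) := PySem.Dict.keys_mk ce
  have hndk : ceKeys.Nodup := by rw [hkeys]; exact hnd
  -- the emotions dict looked up for a key of ce is the stored inner list
  have hem : ∀ p ∈ ce, (PySem.Dict.mk ce).getD p.1 [] = p.2 := by
    intro p hp
    exact PySem.Dict.getD_of_mem_items (PySem.Dict.mk ce) hp (by simpa [PySem.Dict.keys_mk] using hnd) []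
  set T := List.flatMap (fun p => List.map (fun q => (p.1, q.1, q.2)) p.2) ce with hT
  set F := fun c => List.map
      (fun et => (c, et, (PySem.Dict.mk ((PySem.Dict.mk ce).getD c [])).getD et none))
      (PySem.List.sorted (PySem.Dict.mk ((PySem.Dict.mk ce).getD c [])).keys (fun k => k)) with hF
  have hsorted : PySem.List.sorted T (fun t => (toLex (t.1, t.2.1) : Lex (String × String))) =
      List.flatMap F (PySem.List.sorted ceKeys (fun k => k)) := by
    apply PySem.List.sorted_eq_of_perm_of_pairwise_lt
    · -- the flatMap over sorted keys is a permutation of the flat triple list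
      refine ((List.Perm.flatMap (PySem.List.sorted_perm ceKeys (fun k => k) false)
        (fun a _ => List.Perm.refl (F a))).trans ?_)
      rw [hkeys, List.flatMap_map]
      refine List.Perm.flatMap (List.Perm.refl ce) ?_
      intro p hp
      have hemp := hem p hp
      simp only [hF, hemp, PySem.Dict.keys_mk]
      refine ((PySem.List.sorted_perm _ _ _).map _).trans ?_
      rw [List.map_map]
      have : List.map ((fun et => (p.1, et, (PySem.Dict.mk p.2).getD et none)) ∘ (fun q => q.1)) p.2
          = List.map (fun q => (p.1, q.1, q.2)) p.2 := by
        refine List.map_congr_left ?_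
        intro q hq
        have := PySem.Dict.getD_of_mem_items (PySem.Dict.mk p.2) hq
          (by simpa [PySem.Dict.keys_mk] using hinner p hp) (none : Option String)
        simp [Function.comp, this]
      rw [this]
    · -- the flatMap over sorted keys is strictly lexicographically increasing
      apply pairwise_flatMap_lex
      · have h1 := PySem.List.sorted_pairwise ceKeys (fun k => k)
        have h2 : (PySem.List.sorted ceKeys (fun k => k)).Nodup :=
          (PySem.List.sorted_perm ceKeys (fun k => k) false).nodup_iff.mpr hndk
        exact (h1.and h2).imp (fun h => lt_of_le_of_ne h.1 h.2)
      · intro c hc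
        have hc' : c ∈ ceKeys := ((PySem.List.sorted_perm ceKeys (fun k => k) false).mem_iff).mp hc
        rw [hkeys] at hc'
        obtain ⟨p, hp, hp1⟩ := List.mem_map.mp hc'
        have hemc : (PySem.Dict.mk ce).getD c [] = p.2 := by rw [← hp1]; exact hem p hp
        simp only [hF, hemc, PySem.Dict.keys_mk, List.pairwise_map]
        have h1 := PySem.List.sorted_pairwise (p.2.map (fun q => q.1)) (fun k => k)
        have h2 : (PySem.List.sorted (p.2.map (fun q => q.1)) (fun k => k)).Nodup :=
          (PySem.List.sorted_perm (p.2.map (fun q => q.1)) (fun k => k) false).nodup_iff.mpr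
            (hinner p hp)
        refine (h1.and h2).imp ?_
        intro a b h
        rw [Prod.Lex.lt_iff]
        right
        exact ⟨rfl, lt_of_le_of_ne h.1 h.2⟩
      · intro c hc t ht
        simp only [hF] at ht
        obtain ⟨et, _, rfl⟩ := List.mem_map.mp ht
        rfl
  rw [hsorted, List.map_flatMap]
  refine List.flatMap_congr ?_
  intro c hc
  simp [hF, List.map_map, Function.comp]
-- ===== VERDICT (by name: the statement is the Claim_ definition above) =====
theorem build_character_emotion_rows_spec : Claim_equal_build_character_emotion_rows := by
  intro data _hdom hpre
  unfold Spec_build_character_emotion_rows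
  exact build_character_emotion_rows_eq data hpre
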